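-- pv_equiv track=rewrite | github.com/arnoudhgz/aoc | 2024/10/part1.py | count_reachable_nines
-- ===== SOURCE A (Python) =====
-- from collections import deque
--
-- def count_reachable_nines(map, start):
--     rows, cols = len(map), len(map[0])
--     visited = set()
--     queue = deque([start])
--     reachable_nines = 0
--
--     # Directions: up, down, left, right
--     directions = [(-1, 0), (1, 0), (0, -1), (0, 1)]
--
--     while queue:
--         x, y = queue.popleft()
--         if (x, y) in visited:
--             continue
--         visited.add((x, y))
--
--         # If we reach height 9, increment the count
--         if map[x][y] == 9:
--             reachable_nines += 1
--
--         # Explore neighbors with height increase of exactly 1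
--         for dx, dy in directions:
--             nx, ny = x + dx, y + dy
--             if 0 <= nx < rows and 0 <= ny < cols and (nx, ny) not in visited:
--                 if map[nx][ny] == map[x][y] + 1:
--                     queue.append((nx, ny))
--
--     return reachable_nines
-- ===== SOURCE B (Python) =====
-- def count_reachable_nines(map, start):
--     rows, cols = len(map), len(map[0])
--     h0 = map[start[0]][start[1]]
--     if h0 > 9:
--         return 0
--     frontier = {start}
--     # heights increase by exactly 1 per step, so every reachable cell of
--     # height h lies exactly h - h0 steps away: expand one height level at a time
--     for h in range(h0, 9):
--         nxt = set()
--         for x, y in frontier: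
--             for nx, ny in ((x - 1, y), (x + 1, y), (x, y - 1), (x, y + 1)):
--                 if 0 <= nx < rows and 0 <= ny < cols and map[nx][ny] == h + 1:
--                     nxt.add((nx, ny))
--         frontier = nxt
--     return len(frontier)
-- ===== Notes on version B (the rewrite author's own statement) =====
-- stated objective: alternative
-- what changed: Replaces the visited-set BFS queue by a level-synchronous sweep over heights h0..9: every step raises the height by exactly 1, so the reachable 9-cells are exactly the frontier after 9-h0 expansion rounds, and no visited set, queue or per-cell 9-test is needed (it also never explores cells of height above 9).
-- outside the precondition, e.g. on count_reachable_nines([[9, 9], [1]], (0, 0)): A returns 1, B returns 1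
import Mathlib
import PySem

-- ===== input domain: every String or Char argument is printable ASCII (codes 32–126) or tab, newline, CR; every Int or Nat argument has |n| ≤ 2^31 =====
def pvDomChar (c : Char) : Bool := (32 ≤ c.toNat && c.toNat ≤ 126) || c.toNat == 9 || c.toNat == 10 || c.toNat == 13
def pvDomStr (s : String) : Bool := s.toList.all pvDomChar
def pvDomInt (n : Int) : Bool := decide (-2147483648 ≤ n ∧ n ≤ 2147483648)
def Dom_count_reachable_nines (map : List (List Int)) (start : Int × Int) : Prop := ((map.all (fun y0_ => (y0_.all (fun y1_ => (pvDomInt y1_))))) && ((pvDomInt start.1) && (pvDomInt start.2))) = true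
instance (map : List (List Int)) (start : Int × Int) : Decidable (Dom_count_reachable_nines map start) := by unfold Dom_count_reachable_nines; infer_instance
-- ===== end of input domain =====

-- B replaces the visited-set BFS by a level-synchronous sweep over heights h0..9 (every
-- step raises the height by exactly 1, so the reachable 9s are exactly the frontier after
-- 9-h0 rounds); same return value on the stated domain (objective: alternative algorithm).

-- ===== PORT A =====
-- map[x][y] (Python indexing, negative wraps); total with a dummy 0 outside, which
-- Pre_ keeps unreachable.
def pvAt (map : List (List Int)) (x y : Int) : Int :=
  (PySem.List.pyGet? ((PySem.List.pyGet? map x).getD []) y).getD 0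

def pvDirs : List (Int × Int) := [(-1, 0), (1, 0), (0, -1), (0, 1)]

-- the while-queue loop of A; fuel only makes it total (5*(rows*cols+1)+1 steps always suffice)
def bfsA (map : List (List Int)) (rows cols : Int) :
    Nat → List (Int × Int) → PySem.Set (Int × Int) → Int → Int
  | 0, _, _, count => count
  | _ + 1, [], _, count => count
  | fuel + 1, (x, y) :: rest, visited, count =>
    if (x, y) ∈ visited then bfsA map rows cols fuel rest visited count
    else
      let visited' := PySem.Set.add visited (x, y)
      let count' := if pvAt map x y = 9 then count + 1 else count
      let queue' := pvDirs.foldl (fun q d =>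
        if 0 ≤ x + d.1 ∧ x + d.1 < rows ∧ 0 ≤ y + d.2 ∧ y + d.2 < cols ∧
            (x + d.1, y + d.2) ∉ visited' ∧
            pvAt map (x + d.1) (y + d.2) = pvAt map x y + 1
        then q ++ [(x + d.1, y + d.2)] else q) rest
      bfsA map rows cols fuel queue' visited' count'

def count_reachable_nines (map : List (List Int)) (start : Int × Int) : Int :=
  bfsA map map.length (map.headD []).length
    (5 * (map.length * (map.headD []).length + 1) + 1) [start] PySem.Set.empty 0

-- ===== PORT B =====
def pvNbrs (c : Int × Int) : List (Int × Int) :=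
  [(c.1 - 1, c.2), (c.1 + 1, c.2), (c.1, c.2 - 1), (c.1, c.2 + 1)]

-- one expansion round: the in-bounds neighbours of the frontier at height h+1
def levelB (map : List (List Int)) (rows cols h : Int)
    (frontier : PySem.Set (Int × Int)) : PySem.Set (Int × Int) :=
  frontier.foldl (fun nxt c =>
    (pvNbrs c).foldl (fun nxt n =>
      if 0 ≤ n.1 ∧ n.1 < rows ∧ 0 ≤ n.2 ∧ n.2 < cols ∧ pvAt map n.1 n.2 = h + 1
      then PySem.Set.add nxt n else nxt) nxt) PySem.Set.empty

def count_reachable_nines_alt (map : List (List Int)) (start : Int × Int) : Int :=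
  let rows : Int := map.length
  let cols : Int := (map.headD []).length
  let h0 := pvAt map start.1 start.2
  if 9 < h0 then 0
  else ((PySem.List.pyRange h0 9 1).foldl
    (fun frontier h => levelB map rows cols h frontier)
    (PySem.Set.ofList [start])).length

-- ===== PRECONDITION & SPEC =====
-- Pre_ excludes inputs where the Python can raise IndexError: the empty map, a start index
-- outside Python's index range, and maps with a row shorter than row 0 (the in-bounds check
-- uses len(map[0]), so a reachable shorter row raises mid-search; on the excluded ragged
-- inputs where A happens to return, B returns the same value — see the cite).
def Pre_count_reachable_nines (map : List (List Int)) (start : Int × Int) : Prop :=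
  map ≠ [] ∧ (∀ row ∈ map, (map.headD []).length ≤ row.length) ∧
  -(map.length : Int) ≤ start.1 ∧ start.1 < (map.length : Int) ∧
  -((((PySem.List.pyGet? map start.1).getD []).length : Int)) ≤ start.2 ∧
    start.2 < ((((PySem.List.pyGet? map start.1).getD []).length : Int))

instance (map : List (List Int)) (start : Int × Int) : Decidable (Pre_count_reachable_nines map start) := by
  unfold Pre_count_reachable_nines; infer_instance

def pvWitness_count_reachable_nines : List (List Int) × (Int × Int) := ([[8, 9], [9, 2]], (0, 0))

def Spec_count_reachable_nines (map : List (List Int)) (start : Int × Int) (out : Int) : Prop := out = count_reachable_nines_alt map start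
instance (map : List (List Int)) (start : Int × Int) (out : Int) : Decidable (Spec_count_reachable_nines map start out) := by unfold Spec_count_reachable_nines; infer_instance

-- ===== CLAIM (what is proved, stated in full; the proofs are below) =====
def Claim_equal_count_reachable_nines : Prop := ∀ (map : List (List Int)) (start : Int × Int), Dom_count_reachable_nines map start → Pre_count_reachable_nines map start → Spec_count_reachable_nines map start (count_reachable_nines map start)

-- ===== LEMMAS AND PROOFS =====

-- one-step adjacency of A's/B's search: c is an in-bounds 4-neighbour of b one height up
def adjP (map : List (List Int)) (rows cols : Int) (b c : Int × Int) : Prop :=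
  c ∈ pvNbrs b ∧ 0 ≤ c.1 ∧ c.1 < rows ∧ 0 ≤ c.2 ∧ c.2 < cols ∧
    pvAt map c.1 c.2 = pvAt map b.1 b.2 + 1

-- cells reachable from q in exactly n steps
def reachF (map : List (List Int)) (rows cols : Int) (q : Int × Int) :
    Nat → (Int × Int) → Prop
  | 0, c => c = q
  | n + 1, c => ∃ b, reachF map rows cols q n b ∧ adjP map rows cols b c

-- heights are forced along a path
theorem reachF_val (map : List (List Int)) (rows cols : Int) (q : Int × Int) :
    ∀ n c, reachF map rows cols q n c → pvAt map c.1 c.2 = pvAt map q.1 q.2 + n := by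
  intro n
  induction n with
  | zero => intro c h; cases h; simp
  | succ n ih =>
    rintro c ⟨b, hb, hadj⟩
    rw [hadj.2.2.2.2.2, ih b hb]
    push_cast; ring

theorem reachF_step_left (map : List (List Int)) (rows cols : Int) (a b : Int × Int)
    (hab : adjP map rows cols a b) :
    ∀ n z, reachF map rows cols b n z → reachF map rows cols a (n + 1) z := by
  intro n
  induction n with
  | zero => intro z hz; cases hz; exact ⟨a, rfl, hab⟩
  | succ n ih => rintro z ⟨d, hd, hadj⟩; exact ⟨d, ih d hd, hadj⟩

-- membership in A's enqueue fold
theorem mem_queueA (map : List (List Int)) (rows cols : Int) (x y : Int)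
    (visited' : PySem.Set (Int × Int)) (rest : List (Int × Int)) (z : Int × Int) :
    z ∈ pvDirs.foldl (fun q d =>
        if 0 ≤ x + d.1 ∧ x + d.1 < rows ∧ 0 ≤ y + d.2 ∧ y + d.2 < cols ∧
            (x + d.1, y + d.2) ∉ visited' ∧
            pvAt map (x + d.1) (y + d.2) = pvAt map x y + 1
        then q ++ [(x + d.1, y + d.2)] else q) rest ↔
      z ∈ rest ∨ (adjP map rows cols (x, y) z ∧ z ∉ visited') := by
  rw [PySem.List.foldl_append_ite
    (p := fun d : Int × Int => 0 ≤ x + d.1 ∧ x + d.1 < rows ∧ 0 ≤ y + d.2 ∧ y + d.2 < cols ∧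
      (x + d.1, y + d.2) ∉ visited' ∧ pvAt map (x + d.1) (y + d.2) = pvAt map x y + 1)
    (f := fun d : Int × Int => (x + d.1, y + d.2))]
  have hmap : pvDirs.map (fun d : Int × Int => (x + d.1, y + d.2)) = pvNbrs (x, y) := by
    simp [pvDirs, pvNbrs, Prod.ext_iff]; omega
  simp only [List.mem_append, List.mem_map, List.mem_filter, decide_eq_true_eq]
  constructor
  · rintro (h | ⟨d, ⟨hd, h1, h2, h3, h4, h5, h6⟩, rfl⟩)
    · exact Or.inl h
    · refine Or.inr ⟨⟨?_, h1, h2, h3, h4, h6⟩, h5⟩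
      rw [← hmap]
      exact List.mem_map_of_mem hd
  · rintro (h | ⟨⟨hnbr, h1, h2, h3, h4, h6⟩, h5⟩)
    · exact Or.inl h
    · rw [← hmap] at hnbr
      rcases List.mem_map.1 hnbr with ⟨d, hd, rfl⟩
      exact Or.inr ⟨d, ⟨hd, h1, h2, h3, h4, h5, h6⟩, rfl⟩

-- anything adj-reachable from a visited cell is already covered by visited ∪ queue
theorem reach_covered (map : List (List Int)) (rows cols : Int)
    (queue visited : List (Int × Int))
    (closed : ∀ v ∈ visited, ∀ z, adjP map rows cols v z → z ∈ visited ∨ z ∈ queue) :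
    ∀ n b c, b ∈ visited → reachF map rows cols b n c →
      c ∈ visited ∨ ∃ q ∈ queue, ∃ m, reachF map rows cols q m c := by
  intro n
  induction n with
  | zero =>
    intro b c hb hc; cases hc; exact Or.inl hb
  | succ n ih =>
    rintro b c hb ⟨d, hd, hadj⟩
    rcases ih b d hb hd with hdv | ⟨q, hq, m, hr⟩
    · rcases closed d hdv c hadj with h | h
      · exact Or.inl h
      · exact Or.inr ⟨c, h, 0, rfl⟩
    · exact Or.inr ⟨q, hq, m + 1, ⟨d, hr, hadj⟩⟩

-- shadow of bfsA that returns the final visited set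
def bfsVis (map : List (List Int)) (rows cols : Int) :
    Nat → List (Int × Int) → PySem.Set (Int × Int) → PySem.Set (Int × Int)
  | 0, _, visited => visited
  | _ + 1, [], visited => visited
  | fuel + 1, (x, y) :: rest, visited =>
    if (x, y) ∈ visited then bfsVis map rows cols fuel rest visited
    else
      let visited' := PySem.Set.add visited (x, y)
      let queue' := pvDirs.foldl (fun q d =>
        if 0 ≤ x + d.1 ∧ x + d.1 < rows ∧ 0 ≤ y + d.2 ∧ y + d.2 < cols ∧
            (x + d.1, y + d.2) ∉ visited' ∧
            pvAt map (x + d.1) (y + d.2) = pvAt map x y + 1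
        then q ++ [(x + d.1, y + d.2)] else q) rest
      bfsVis map rows cols fuel queue' visited'

-- bfsA's count is the number of 9-cells of the final visited set
theorem bfsA_eq_count (map : List (List Int)) (rows cols : Int) :
    ∀ fuel queue visited count,
      bfsA map rows cols fuel queue visited count =
        count + (((bfsVis map rows cols fuel queue visited).filter
            (fun c => decide (pvAt map c.1 c.2 = 9))).length : Int) -
          ((visited.filter (fun c => decide (pvAt map c.1 c.2 = 9))).length : Int) := by
  intro fuel
  induction fuel with
  | zero => intro queue visited count; simp [bfsA, bfsVis]
  | succ fuel ih =>
    rintro (_ | ⟨⟨x, y⟩, rest⟩) visited count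
    · simp [bfsA, bfsVis]
    · by_cases hv : (x, y) ∈ visited
      · simp only [bfsA, bfsVis, if_pos hv]; exact ih rest visited count
      · simp only [bfsA, bfsVis, if_neg hv]
        rw [ih, PySem.Set.add_of_not_mem hv]
        simp only [List.filter_append, List.length_append]
        by_cases h9 : pvAt map x y = 9
        · simp [h9]; ring
        · simp [h9]

-- adding a fresh candidate to visited strictly shrinks the unvisited-candidate count
theorem filter_notmem_dec (L : List (Int × Int)) (V : List (Int × Int)) (c : Int × Int)
    (hcL : c ∈ L) (hcV : c ∉ V) :
    ((L.filter (fun z => decide (z ∉ V ++ [c]))).length) + 1 ≤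
      (L.filter (fun z => decide (z ∉ V))).length := by
  induction L with
  | nil => cases hcL
  | cons a t ih =>
    by_cases hac : a = c
    · subst hac
      simp only [List.filter_cons, show (decide (a ∉ V ++ [a])) = false by simp,
        show (decide (a ∉ V)) = true by simpa using hcV, Bool.false_eq_true, if_false, if_true]
      have hmono : (t.filter (fun z => decide (z ∉ V ++ [a]))).length ≤
          (t.filter (fun z => decide (z ∉ V))).length := by
        rw [← List.countP_eq_length_filter, ← List.countP_eq_length_filter]
        refine List.countP_mono_left (fun z _ h => ?_)
        simp only [decide_eq_true_eq, List.mem_append] at h ⊢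
        exact fun hzV => h (Or.inl hzV)
      simp only [List.length_cons]
      omega
    · have hct : c ∈ t := by
        rcases List.mem_cons.1 hcL with h | h
        · exact absurd h.symm hac
        · exact h
      have hdec : (decide (a ∉ V ++ [c])) = (decide (a ∉ V)) := by
        apply decide_eq_decide.mpr
        simp [hac]
      simp only [List.filter_cons, hdec]
      by_cases haV : a ∉ V
      · rw [if_pos (by simpa using haV), if_pos (by simpa using haV)]
        simp only [List.length_cons]
        have := ih hct
        omega
      · rw [if_neg (by simpa using haV), if_neg (by simpa using haV)]
        exact ih hct

-- the BFS invariant: the final visited set is exactly visited ∪ (reachable from the queue)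
theorem bfsVis_spec (map : List (List Int)) (rows cols : Int) (Cand : List (Int × Int))
    (hGrid : ∀ z : Int × Int, 0 ≤ z.1 → z.1 < rows → 0 ≤ z.2 → z.2 < cols → z ∈ Cand) :
    ∀ fuel queue visited,
      (∀ q ∈ queue, q ∈ Cand) →
      (∀ v ∈ visited, ∀ z, adjP map rows cols v z → z ∈ visited ∨ z ∈ queue) →
      visited.Nodup →
      5 * ((Cand.filter (fun c => decide (c ∉ visited))).length) + queue.length ≤ fuel →
      (bfsVis map rows cols fuel queue visited).Nodup ∧
      ∀ c, c ∈ bfsVis map rows cols fuel queue visited ↔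
        c ∈ visited ∨ ∃ q ∈ queue, ∃ n, reachF map rows cols q n c := by
  intro fuel
  induction fuel with
  | zero =>
    intro queue visited hq closed hnd hfuel
    have hqnil : queue = [] := by
      have : queue.length = 0 := by omega
      exact List.eq_nil_of_length_eq_zero this
    subst hqnil
    refine ⟨hnd, fun c => ?_⟩
    simp [bfsVis]
  | succ fuel ih =>
    rintro (_ | ⟨⟨x, y⟩, rest⟩) visited hq closed hnd hfuel
    · refine ⟨hnd, fun c => ?_⟩; simp [bfsVis]
    · by_cases hv : (x, y) ∈ visited
      · have closed' : ∀ v ∈ visited, ∀ z, adjP map rows cols v z → z ∈ visited ∨ z ∈ rest := by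
          intro v hvv z hz
          rcases closed v hvv z hz with h | h
          · exact Or.inl h
          · rcases List.mem_cons.1 h with rfl | h
            · exact Or.inl hv
            · exact Or.inr h
        obtain ⟨hnd2, hmem2⟩ := ih rest visited (fun q hq' => hq q (List.mem_cons_of_mem _ hq'))
          closed' hnd (by simp only [List.length_cons] at hfuel; omega)
        rw [show bfsVis map rows cols (fuel + 1) ((x, y) :: rest) visited =
          bfsVis map rows cols fuel rest visited from by simp [bfsVis, hv]]
        refine ⟨hnd2, fun c => ?_⟩
        rw [hmem2 c]
        constructor
        · rintro (h | ⟨q, hq', n, hr⟩)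
          · exact Or.inl h
          · exact Or.inr ⟨q, List.mem_cons_of_mem _ hq', n, hr⟩
        · rintro (h | ⟨q, hq', n, hr⟩)
          · exact Or.inl h
          · rcases List.mem_cons.1 hq' with rfl | hq''
            · exact reach_covered map rows cols rest visited closed' n _ c hv hr
            · exact Or.inr ⟨q, hq'', n, hr⟩
      · have hadd : PySem.Set.add visited (x, y) = visited ++ [(x, y)] :=
          PySem.Set.add_of_not_mem hv
        have hstep : bfsVis map rows cols (fuel + 1) ((x, y) :: rest) visited =
            bfsVis map rows cols fuel (pvDirs.foldl (fun q d =>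
              if 0 ≤ x + d.1 ∧ x + d.1 < rows ∧ 0 ≤ y + d.2 ∧ y + d.2 < cols ∧
                  (x + d.1, y + d.2) ∉ PySem.Set.add visited (x, y) ∧
                  pvAt map (x + d.1) (y + d.2) = pvAt map x y + 1
              then q ++ [(x + d.1, y + d.2)] else q) rest) (PySem.Set.add visited (x, y)) := by
          simp [bfsVis, hv]
        set visited' := PySem.Set.add visited (x, y) with hvisdef
        set queue' := pvDirs.foldl (fun q d =>
              if 0 ≤ x + d.1 ∧ x + d.1 < rows ∧ 0 ≤ y + d.2 ∧ y + d.2 < cols ∧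
                  (x + d.1, y + d.2) ∉ visited' ∧
                  pvAt map (x + d.1) (y + d.2) = pvAt map x y + 1
              then q ++ [(x + d.1, y + d.2)] else q) rest with hqdef
        have hqmem : ∀ z, z ∈ queue' ↔
            z ∈ rest ∨ (adjP map rows cols (x, y) z ∧ z ∉ visited') := by
          intro z; rw [hqdef]; exact mem_queueA map rows cols x y visited' rest z
        have hq' : ∀ q ∈ queue', q ∈ Cand := by
          intro q hq0
          rcases (hqmem q).1 hq0 with h | ⟨hadj, _⟩
          · exact hq q (List.mem_cons_of_mem _ h)
          · exact hGrid q hadj.2.1 hadj.2.2.1 hadj.2.2.2.1 hadj.2.2.2.2.1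
        have closed'' : ∀ v ∈ visited', ∀ z, adjP map rows cols v z →
            z ∈ visited' ∨ z ∈ queue' := by
          intro v hvv z hz
          rw [hadd] at hvv
          rcases List.mem_append.1 hvv with hvv | hvv
          · rcases closed v hvv z hz with h | h
            · exact Or.inl (by rw [hadd]; exact List.mem_append_left _ h)
            · rcases List.mem_cons.1 h with rfl | h
              · exact Or.inl (by rw [hadd]; simp)
              · exact Or.inr ((hqmem z).2 (Or.inl h))
          · have hvxy : v = (x, y) := by simpa using hvv
            subst hvxy
            by_cases hzv : z ∈ visited'
            · exact Or.inl hzv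
            · exact Or.inr ((hqmem z).2 (Or.inr ⟨hz, hzv⟩))
        have hnd' : visited'.Nodup := by
          rw [hvisdef]
          exact PySem.Set.nodup_add _ _ hnd
        have hql : queue'.length ≤ rest.length + 4 := by
          rw [hqdef, PySem.List.foldl_append_ite
            (p := fun d : Int × Int => 0 ≤ x + d.1 ∧ x + d.1 < rows ∧ 0 ≤ y + d.2 ∧
              y + d.2 < cols ∧ (x + d.1, y + d.2) ∉ visited' ∧
              pvAt map (x + d.1) (y + d.2) = pvAt map x y + 1)
            (f := fun d : Int × Int => (x + d.1, y + d.2))]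
          have hfl := List.length_filter_le (fun d : Int × Int =>
            decide (0 ≤ x + d.1 ∧ x + d.1 < rows ∧ 0 ≤ y + d.2 ∧ y + d.2 < cols ∧
              (x + d.1, y + d.2) ∉ visited' ∧
              pvAt map (x + d.1) (y + d.2) = pvAt map x y + 1)) pvDirs
          simp only [List.length_append, List.length_map]
          simp only [pvDirs, List.length_cons, List.length_nil] at hfl ⊢
          omega
        have hfuel' : 5 * ((Cand.filter (fun c => decide (c ∉ visited'))).length) +
            queue'.length ≤ fuel := by
          have hdec := filter_notmem_dec Cand visited (x, y) (hq _ (List.mem_cons_self ..)) hv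
          rw [hadd]
          simp only [List.length_cons] at hfuel
          omega
        obtain ⟨hndF, hmemF⟩ := ih queue' visited' hq' closed'' hnd' hfuel'
        rw [hstep]
        refine ⟨hndF, fun c => ?_⟩
        rw [hmemF c]
        constructor
        · rintro (h | ⟨q, hq0, n, hr⟩)
          · rw [hadd] at h
            rcases List.mem_append.1 h with h | h
            · exact Or.inl h
            · exact Or.inr ⟨(x, y), List.mem_cons_self .., 0, by simpa using h⟩
          · rcases (hqmem q).1 hq0 with h | ⟨hadj, _⟩
            · exact Or.inr ⟨q, List.mem_cons_of_mem _ h, n, hr⟩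
            · exact Or.inr ⟨(x, y), List.mem_cons_self .., n + 1,
                reachF_step_left map rows cols _ _ hadj n c hr⟩
        · rintro (h | ⟨q, hq0, n, hr⟩)
          · exact Or.inl (by rw [hadd]; exact List.mem_append_left _ h)
          · rcases List.mem_cons.1 hq0 with rfl | hq1
            · exact reach_covered map rows cols queue' visited' closed'' n _ c
                (by rw [hadd]; simp) hr
            · exact Or.inr ⟨q, (hqmem q).2 (Or.inl hq1), n, hr⟩

-- one inner add-loop of levelB
theorem levelB_inner (map : List (List Int)) (rows cols h : Int) (p : Int × Int)
    (s0 : PySem.Set (Int × Int)) (hnd : s0.Nodup) :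
    ((pvNbrs p).foldl (fun nxt n =>
        if 0 ≤ n.1 ∧ n.1 < rows ∧ 0 ≤ n.2 ∧ n.2 < cols ∧ pvAt map n.1 n.2 = h + 1
        then PySem.Set.add nxt n else nxt) s0).Nodup ∧
    ∀ z, z ∈ (pvNbrs p).foldl (fun nxt n =>
        if 0 ≤ n.1 ∧ n.1 < rows ∧ 0 ≤ n.2 ∧ n.2 < cols ∧ pvAt map n.1 n.2 = h + 1
        then PySem.Set.add nxt n else nxt) s0 ↔
      z ∈ s0 ∨ (z ∈ pvNbrs p ∧ 0 ≤ z.1 ∧ z.1 < rows ∧ 0 ≤ z.2 ∧ z.2 < cols ∧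
        pvAt map z.1 z.2 = h + 1) := by
  rw [PySem.List.foldl_ite_eq_foldl_filter]
  have hupd : ((pvNbrs p).filter (fun n => decide (0 ≤ n.1 ∧ n.1 < rows ∧ 0 ≤ n.2 ∧ n.2 < cols ∧
      pvAt map n.1 n.2 = h + 1))).foldl (fun nxt n => PySem.Set.add nxt n) s0 =
      PySem.Set.update s0 ((pvNbrs p).filter (fun n => decide (0 ≤ n.1 ∧ n.1 < rows ∧ 0 ≤ n.2 ∧
        n.2 < cols ∧ pvAt map n.1 n.2 = h + 1))) := rfl
  rw [hupd]
  refine ⟨PySem.Set.nodup_update _ _ hnd, fun z => ?_⟩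
  rw [PySem.Set.mem_update]
  simp [List.mem_filter]

theorem levelB_aux (map : List (List Int)) (rows cols h : Int) (fr : List (Int × Int)) :
    ∀ (s0 : PySem.Set (Int × Int)), s0.Nodup →
      ((fr.foldl (fun nxt c => (pvNbrs c).foldl (fun nxt n =>
          if 0 ≤ n.1 ∧ n.1 < rows ∧ 0 ≤ n.2 ∧ n.2 < cols ∧ pvAt map n.1 n.2 = h + 1
          then PySem.Set.add nxt n else nxt) nxt) s0).Nodup ∧
      ∀ z, z ∈ fr.foldl (fun nxt c => (pvNbrs c).foldl (fun nxt n =>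
          if 0 ≤ n.1 ∧ n.1 < rows ∧ 0 ≤ n.2 ∧ n.2 < cols ∧ pvAt map n.1 n.2 = h + 1
          then PySem.Set.add nxt n else nxt) nxt) s0 ↔
        z ∈ s0 ∨ ∃ p ∈ fr, z ∈ pvNbrs p ∧ 0 ≤ z.1 ∧ z.1 < rows ∧ 0 ≤ z.2 ∧ z.2 < cols ∧
          pvAt map z.1 z.2 = h + 1) := by
  induction fr with
  | nil => intro s0 h0; simpa using h0
  | cons p fr ih =>
    intro s0 h0
    obtain ⟨hnd1, hmem1⟩ := levelB_inner map rows cols h p s0 h0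
    obtain ⟨hnd2, hmem2⟩ := ih _ hnd1
    refine ⟨hnd2, fun z => ?_⟩
    rw [List.foldl_cons, hmem2 z, hmem1 z]
    constructor
    · rintro ((h | h) | ⟨q, hq, hrest⟩)
      · exact Or.inl h
      · exact Or.inr ⟨p, List.mem_cons_self .., h⟩
      · exact Or.inr ⟨q, List.mem_cons_of_mem _ hq, hrest⟩
    · rintro (h | ⟨q, hq, hrest⟩)
      · exact Or.inl (Or.inl h)
      · rcases List.mem_cons.1 hq with rfl | hq
        · exact Or.inl (Or.inr hrest)
        · exact Or.inr ⟨q, hq, hrest⟩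

-- membership in B's one-round expansion
theorem mem_levelB (map : List (List Int)) (rows cols h : Int)
    (frontier : PySem.Set (Int × Int)) (z : Int × Int) :
    z ∈ levelB map rows cols h frontier ↔
      ∃ p ∈ frontier, z ∈ pvNbrs p ∧ 0 ≤ z.1 ∧ z.1 < rows ∧ 0 ≤ z.2 ∧ z.2 < cols ∧
        pvAt map z.1 z.2 = h + 1 := by
  have := (levelB_aux map rows cols h frontier PySem.Set.empty (by simp [PySem.Set.empty])).2 z
  unfold levelB
  rw [this]
  simp [PySem.Set.empty]

theorem nodup_levelB (map : List (List Int)) (rows cols h : Int)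
    (frontier : PySem.Set (Int × Int)) :
    (levelB map rows cols h frontier).Nodup := by
  exact (levelB_aux map rows cols h frontier PySem.Set.empty (by simp [PySem.Set.empty])).1

-- the level sweep computes exactly the cells reachable in n + m steps
theorem levelsB (map : List (List Int)) (rows cols : Int) (start : Int × Int) :
    ∀ (m : Nat) (a : Int) (n : Nat) (fr : PySem.Set (Int × Int)),
      a = pvAt map start.1 start.2 + n →
      fr.Nodup →
      (∀ c, c ∈ fr ↔ reachF map rows cols start n c) →
      ((PySem.List.pyRange a (a + m) 1).foldl
          (fun frontier h => levelB map rows cols h frontier) fr).Nodup ∧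
      ∀ c, c ∈ (PySem.List.pyRange a (a + m) 1).foldl
          (fun frontier h => levelB map rows cols h frontier) fr ↔
        reachF map rows cols start (n + m) c := by
  intro m
  induction m with
  | zero =>
    intro a n fr hval hnd hmem
    rw [show a + ((0 : Nat) : Int) = a from by push_cast; ring,
      show PySem.List.pyRange a a 1 = [] from by simp [PySem.List.pyRange]]
    exact ⟨hnd, fun c => by simpa using hmem c⟩
  | succ m ih =>
    intro a n fr hval hnd hmem
    rw [show PySem.List.pyRange a (a + ((m + 1 : Nat) : Int)) 1 =
        a :: PySem.List.pyRange (a + 1) (a + ((m + 1 : Nat) : Int)) 1 from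
      PySem.List.pyRange_one_cons (by push_cast; omega), List.foldl_cons,
      show a + ((m + 1 : Nat) : Int) = (a + 1) + ((m : Nat) : Int) from by push_cast; ring]
    have hmem' : ∀ c, c ∈ levelB map rows cols a fr ↔
        reachF map rows cols start (n + 1) c := by
      intro c
      rw [mem_levelB]
      constructor
      · rintro ⟨p, hp, hnbr, h1, h2, h3, h4, hv9⟩
        have hrp := (hmem p).1 hp
        refine ⟨p, hrp, hnbr, h1, h2, h3, h4, ?_⟩
        rw [hv9, reachF_val map rows cols start n p hrp, hval]
      · rintro ⟨b, hb, hnbr, h1, h2, h3, h4, hv9⟩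
        refine ⟨b, (hmem b).2 hb, hnbr, h1, h2, h3, h4, ?_⟩
        rw [hv9, reachF_val map rows cols start n b hb, hval]
    have := ih (a + 1) (n + 1) (levelB map rows cols a fr)
      (by rw [hval]; push_cast; ring) (nodup_levelB map rows cols a fr) hmem'
    rw [show n + (m + 1) = (n + 1) + m from by omega]
    exact this

-- ===== VERDICT (by name: the statement is the Claim_ definition above) =====
theorem count_reachable_nines_spec : Claim_equal_count_reachable_nines := by
  intro map start _hdom _hpre
  unfold Spec_count_reachable_nines
  -- abbreviations
  have hrows : ((map.length : Int)) = (map.length : Int) := rfl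
  set grid : List (Int × Int) := (List.range map.length).flatMap
    (fun i : Nat => (List.range (map.headD []).length).map (fun j : Nat => ((i : Int), (j : Int)))) with hgrid
  set Cand : List (Int × Int) := start :: grid with hCand
  have hGrid : ∀ z : Int × Int, 0 ≤ z.1 → z.1 < (map.length : Int) → 0 ≤ z.2 →
      z.2 < ((map.headD []).length : Int) → z ∈ Cand := by
    intro z h1 h2 h3 h4
    refine List.mem_cons_of_mem _ ?_
    rw [hgrid]
    simp only [List.mem_flatMap, List.mem_map]
    refine ⟨z.1.toNat, by rw [List.mem_range]; omega, z.2.toNat, by rw [List.mem_range]; omega, ?_⟩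
    rw [Prod.ext_iff]
    exact ⟨by simp; omega, by simp; omega⟩
  have hgl : grid.length = map.length * (map.headD []).length := by
    rw [hgrid]
    simp [List.length_flatMap, List.map_const']
  obtain ⟨hndV, hmemV⟩ := bfsVis_spec map (map.length : Int) ((map.headD []).length : Int)
    Cand hGrid (5 * (map.length * (map.headD []).length + 1) + 1) [start] PySem.Set.empty
    (by intro q hq; rw [List.mem_singleton] at hq; subst hq; exact List.mem_cons_self ..)
    (by intro v hv; simp [PySem.Set.empty] at hv)
    (by simp [PySem.Set.empty])
    (by
      have hfil : (Cand.filter (fun c => decide (c ∉ PySem.Set.empty))).length = Cand.length := by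
        simp [PySem.Set.empty]
      have hlen : Cand.length = map.length * (map.headD []).length + 1 := by
        rw [hCand]; simp [hgl]
      rw [hfil, hlen]
      simp)
  set Vf := bfsVis map (map.length : Int) ((map.headD []).length : Int)
    (5 * (map.length * (map.headD []).length + 1) + 1) [start] PySem.Set.empty with hVf
  have hVmem : ∀ c, c ∈ Vf ↔ ∃ n, reachF map (map.length : Int)
      ((map.headD []).length : Int) start n c := by
    intro c
    rw [hVf, hmemV c]
    simp [PySem.Set.empty]
  have hA : count_reachable_nines map start =
      ((Vf.filter (fun c => decide (pvAt map c.1 c.2 = 9))).length : Int) := by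
    unfold count_reachable_nines
    rw [bfsA_eq_count]
    simp [PySem.Set.empty, hVf]
  rw [hA]
  set h0 := pvAt map start.1 start.2 with hh0
  by_cases hgt : 9 < h0
  · have halt : count_reachable_nines_alt map start = 0 := by
      unfold count_reachable_nines_alt
      rw [← hh0, if_pos hgt]
    rw [halt]
    have hfil : Vf.filter (fun c => decide (pvAt map c.1 c.2 = 9)) = [] := by
      rw [List.filter_eq_nil_iff]
      intro c hc
      obtain ⟨n, hr⟩ := (hVmem c).1 hc
      have := reachF_val map (map.length : Int) ((map.headD []).length : Int) start n c hr
      rw [← hh0] at this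
      simp only [decide_eq_true_eq]
      omega
    rw [hfil]
    simp
  · rw [not_lt] at hgt
    set m : Nat := ((9 : Int) - h0).toNat with hm
    have h9 : (9 : Int) = h0 + (m : Int) := by omega
    have hofl : PySem.Set.ofList [start] = [start] := by
      have := PySem.Set.ofList_eq_self_of_nodup (xs := [start]) (by simp)
      simpa using this
    obtain ⟨hndF, hFmem⟩ := levelsB map (map.length : Int) ((map.headD []).length : Int)
      start m h0 0 [start] (by simp [hh0]) (by simp)
      (by intro c; simp [reachF])
    have halt : count_reachable_nines_alt map start =
        (((PySem.List.pyRange h0 (h0 + (m : Int)) 1).foldl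
          (fun frontier h => levelB map (map.length : Int) ((map.headD []).length : Int) h frontier)
          [start]).length : Int) := by
      unfold count_reachable_nines_alt
      rw [← hh0, if_neg (by omega), hofl, ← h9]
    rw [halt]
    congr 1
    have hperm : (Vf.filter (fun c => decide (pvAt map c.1 c.2 = 9))).Perm
        ((PySem.List.pyRange h0 (h0 + (m : Int)) 1).foldl
          (fun frontier h => levelB map (map.length : Int) ((map.headD []).length : Int) h frontier)
          [start]) := by
      rw [List.perm_ext_iff_of_nodup (hndV.filter _) hndF]
      intro z
      rw [List.mem_filter, hFmem z, hVmem z]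
      simp only [decide_eq_true_eq, Nat.zero_add]
      constructor
      · rintro ⟨⟨n, hr⟩, h9z⟩
        have hvn := reachF_val map (map.length : Int) ((map.headD []).length : Int) start n z hr
        rw [← hh0] at hvn
        have hnm : n = m := by omega
        rw [← hnm]
        exact hr
      · intro hr
        have hvm := reachF_val map (map.length : Int) ((map.headD []).length : Int) start m z hr
        rw [← hh0] at hvm
        exact ⟨⟨m, hr⟩, by omega⟩
    exact hperm.length_eq
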